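-- pv_equiv track=rewrite | github.com/Sheshi987/COB- | receipe.py | find_recipes
-- ===== SOURCE A (Python) =====
-- from collections import defaultdict
--
-- recipes = [
--     {'title': 'Macaroni and Cheese', 'ingredients': ['macaroni', 'cheese', 'milk']},
--     {'title': 'Tacos', 'ingredients': ['tortillas', 'chicken', 'lettuce', 'tomatoes']},
--     {'title': 'Chicken Parmesan', 'ingredients': ['chicken breasts', 'all-purpose flour', 'egg', 'parmesan cheese']},
--     {'title': 'Caesar Salad', 'ingredients': ['romaine lettuce', 'chicken', 'caesar dressing']},
-- ]
--
-- def find_recipes(ingredients):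
--     recipe_map = defaultdict(list)
--     for recipe in recipes:
--         for ingredient in recipe['ingredients']:
--             recipe_map[ingredient].append(recipe['title'])
--
--     recipe_titles = []
--     for ingredient in ingredients:
--         recipe_titles.extend(recipe_map[ingredient])
--
--     return list(set(recipe_titles)) # remove duplicates
-- ===== SOURCE B (Python) =====
-- recipes = [
--     {'title': 'Macaroni and Cheese', 'ingredients': ['macaroni', 'cheese', 'milk']},
--     {'title': 'Tacos', 'ingredients': ['tortillas', 'chicken', 'lettuce', 'tomatoes']},
--     {'title': 'Chicken Parmesan', 'ingredients': ['chicken breasts', 'all-purpose flour', 'egg', 'parmesan cheese']},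
--     {'title': 'Caesar Salad', 'ingredients': ['romaine lettuce', 'chicken', 'caesar dressing']},
-- ]
--
-- def find_recipes(ingredients):
--     # direct scan: no inverted index, one set comprehension over (query, recipe) pairs
--     return list({r['title'] for q in ingredients for r in recipes if q in r['ingredients']})
-- ===== Notes on version B (the rewrite author's own statement) =====
-- stated objective: simpler
-- what changed: B drops A's defaultdict inverted-index build and second extend loop, returning the same set of titles from one direct (query ingredient, recipe) membership scan written as a single set comprehension.
import Mathlib
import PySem

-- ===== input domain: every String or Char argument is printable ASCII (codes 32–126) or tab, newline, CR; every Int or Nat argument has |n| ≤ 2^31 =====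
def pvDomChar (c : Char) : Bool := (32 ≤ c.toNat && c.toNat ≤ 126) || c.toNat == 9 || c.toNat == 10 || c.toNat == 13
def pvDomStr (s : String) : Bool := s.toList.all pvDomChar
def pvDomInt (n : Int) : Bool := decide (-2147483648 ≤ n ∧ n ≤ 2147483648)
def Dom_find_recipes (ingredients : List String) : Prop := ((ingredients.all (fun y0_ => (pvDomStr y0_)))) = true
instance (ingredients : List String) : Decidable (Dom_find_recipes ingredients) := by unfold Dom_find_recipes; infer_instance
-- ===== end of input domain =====

-- B drops A's defaultdict inverted index and returns the same recipe titles by one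
-- direct (query, recipe) membership scan — objective: simpler. Return values are
-- compared as sets (Python's list(set(...)) order is not part of the claim).

-- ===== PORT A =====
-- the module-level 'recipes' constant: each dict {'title': t, 'ingredients': l} as the pair (t, l)
def pyRecipes : List (String × List String) :=
  [("Macaroni and Cheese", ["macaroni", "cheese", "milk"]),
   ("Tacos", ["tortillas", "chicken", "lettuce", "tomatoes"]),
   ("Chicken Parmesan", ["chicken breasts", "all-purpose flour", "egg", "parmesan cheese"]),
   ("Caesar Salad", ["romaine lettuce", "chicken", "caesar dressing"])]

def find_recipes (ingredients : List String) : List String :=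
  -- recipe_map = defaultdict(list); nested loop appending titles per ingredient
  let recipe_map : PySem.Dict String (List String) :=
    pyRecipes.foldl
      (fun d recipe =>
        recipe.2.foldl (fun d ingredient => d.modify ingredient [] (· ++ [recipe.1])) d)
      PySem.Dict.empty
  -- recipe_titles = []; for ingredient in ingredients: recipe_titles.extend(recipe_map[ingredient])
  let recipe_titles : List String :=
    ingredients.foldl (fun acc ingredient => acc ++ recipe_map.getD ingredient []) []
  -- list(set(recipe_titles))
  PySem.Set.ofList recipe_titles

-- ===== PORT B =====
def find_recipes_alt (ingredients : List String) : List String :=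
  PySem.Set.ofList
    (ingredients.flatMap (fun q => (pyRecipes.filter (fun r => r.2.contains q)).map (·.1)))

-- ===== PRECONDITION & SPEC =====
def Spec_find_recipes (ingredients : List String) (out : List String) : Prop := out = find_recipes_alt ingredients
instance (ingredients : List String) (out : List String) : Decidable (Spec_find_recipes ingredients out) := by unfold Spec_find_recipes; infer_instance

-- ===== CLAIM (what is proved, stated in full; the proofs are below) =====
def Claim_equal_find_recipes : Prop := ∀ (ingredients : List String), Dom_find_recipes ingredients → Spec_find_recipes ingredients (find_recipes ingredients)

-- ===== LEMMAS AND PROOFS =====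

-- the (ingredient, title) pairs A's nested build loop runs through, in order
def pvPairs : List (String × String) := pyRecipes.flatMap (fun r => r.2.map (fun ing => (ing, r.1)))

-- A's nested dict-build fold is the fold over the flattened pair list
theorem pv_build_eq_pairs_foldl (d : PySem.Dict String (List String)) :
    pyRecipes.foldl
      (fun d recipe =>
        recipe.2.foldl (fun d ingredient => d.modify ingredient [] (· ++ [recipe.1])) d) d
    = pvPairs.foldl (fun d p => d.modify p.1 [] (· ++ [p.2])) d := by
  simp [pvPairs, pyRecipes, List.foldl, List.flatMap]

-- what A's index returns for an arbitrary query string = what B's direct scan returns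
-- pvPairs, evaluated
theorem pvPairs_eval : pvPairs =
    [("macaroni", "Macaroni and Cheese"), ("cheese", "Macaroni and Cheese"), ("milk", "Macaroni and Cheese"),
     ("tortillas", "Tacos"), ("chicken", "Tacos"), ("lettuce", "Tacos"), ("tomatoes", "Tacos"),
     ("chicken breasts", "Chicken Parmesan"), ("all-purpose flour", "Chicken Parmesan"),
     ("egg", "Chicken Parmesan"), ("parmesan cheese", "Chicken Parmesan"),
     ("romaine lettuce", "Caesar Salad"), ("chicken", "Caesar Salad"), ("caesar dressing", "Caesar Salad")] := by
  decide

-- what A's index returns for an arbitrary query string = what B's direct scan returns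
theorem pv_getD_eq_scan (q : String) :
    (pvPairs.foldl (fun d p => d.modify p.1 [] (· ++ [p.2])) PySem.Dict.empty).getD q []
    = (pyRecipes.filter (fun r => r.2.contains q)).map (·.1) := by
  rw [PySem.Dict.getD_foldl_modify_append]
  by_cases h1 : q = "macaroni"; · subst h1; decide
  by_cases h2 : q = "cheese"; · subst h2; decide
  by_cases h3 : q = "milk"; · subst h3; decide
  by_cases h4 : q = "tortillas"; · subst h4; decide
  by_cases h5 : q = "chicken"; · subst h5; decide
  by_cases h6 : q = "lettuce"; · subst h6; decide
  by_cases h7 : q = "tomatoes"; · subst h7; decide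
  by_cases h8 : q = "chicken breasts"; · subst h8; decide
  by_cases h9 : q = "all-purpose flour"; · subst h9; decide
  by_cases h10 : q = "egg"; · subst h10; decide
  by_cases h11 : q = "parmesan cheese"; · subst h11; decide
  by_cases h12 : q = "romaine lettuce"; · subst h12; decide
  by_cases h13 : q = "caesar dressing"; · subst h13; decide
  have hne : ∀ s : String, q ≠ s → (s == q) = false := by
    intro s hs; exact beq_false_of_ne (fun h => hs (h.symm))
  have hne' : ∀ s : String, q ≠ s → (q == s) = false := fun s hs => beq_false_of_ne hs
  rw [pvPairs_eval]
  simp only [pyRecipes, List.filter, List.contains, List.elem_cons, List.elem_nil,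
    hne _ h1, hne _ h2, hne _ h3, hne _ h4, hne _ h5, hne _ h6, hne _ h7,
    hne _ h8, hne _ h9, hne _ h10, hne _ h11, hne _ h12, hne _ h13,
    hne' _ h1, hne' _ h2, hne' _ h3, hne' _ h4, hne' _ h5, hne' _ h6, hne' _ h7,
    hne' _ h8, hne' _ h9, hne' _ h10, hne' _ h11, hne' _ h12, hne' _ h13]
  rfl

theorem find_recipes_spec : Claim_equal_find_recipes := by
  intro ingredients _
  unfold Spec_find_recipes find_recipes find_recipes_alt
  dsimp only
  rw [pv_build_eq_pairs_foldl, PySem.List.foldl_append_eq_flatMap]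
  simp only [List.nil_append, pv_getD_eq_scan]
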